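-- pv_equiv track=rewrite | github.com/IUT-Blagnac/sae2024-2-02-NicolasRuiz2005 | analyse/Simplicite/28simplicite.py | RLE_recursive
-- ===== SOURCE A (Python) =====
-- def RLE_recursive(input, iteration):
--
--     if input == "" or iteration == 0:
--         return input
--
--     if iteration <= 0:
--         raise "Le nombre d'itérations ne peut pas être négatif ou nul !"
--
--
--
--     cpt = 1
--     chaine_compressee = ""
--     length = len(input)
--
--     i = 0
--
--     while i < length:
--         if i != length - 1:
--             if input[i] == input[i + 1]:
--                 cpt += 1
--                 if cpt == 9:
--                     chaine_compressee += str(cpt) + input[i]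
--                     cpt = 1
--                     i += 1
--             else:
--                 chaine_compressee += str(cpt) + input[i]
--                 cpt = 1
--         else:
--             chaine_compressee += str(cpt) + input[i]
--         i += 1
--
--     return RLE_recursive(chaine_compressee, iteration - 1)
-- ===== SOURCE B (Python) =====
-- def RLE_recursive(input, iteration):
--     if input == "" or iteration == 0:
--         return input
--
--     if iteration <= 0:
--         raise "Le nombre d'itérations ne peut pas être négatif ou nul !"
--
--     for _ in range(iteration):
--         out = []
--         app = out.append
--         prev = input[0]
--         run = 1
--         for ch in input[1:]:
--             if ch == prev:
--                 run += 1
--             else: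
--                 q, r = divmod(run, 9)
--                 if q:
--                     app(('9' + prev) * q)
--                 if r:
--                     app(str(r) + prev)
--                 prev = ch
--                 run = 1
--         q, r = divmod(run, 9)
--         if q:
--             app(('9' + prev) * q)
--         if r:
--             app(str(r) + prev)
--         input = ''.join(out)
--     return input
-- ===== Notes on version B (the rewrite author's own statement) =====
-- stated objective: alternative
-- what changed: A's per-character counter state machine with a cap-at-9 skip, tail-recursive over iteration, is replaced by a single fold per pass carrying (prev, run) that emits each maximal run's chunks in closed form via divmod(run,9), inside a flat loop over iteration.
import Mathlib
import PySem

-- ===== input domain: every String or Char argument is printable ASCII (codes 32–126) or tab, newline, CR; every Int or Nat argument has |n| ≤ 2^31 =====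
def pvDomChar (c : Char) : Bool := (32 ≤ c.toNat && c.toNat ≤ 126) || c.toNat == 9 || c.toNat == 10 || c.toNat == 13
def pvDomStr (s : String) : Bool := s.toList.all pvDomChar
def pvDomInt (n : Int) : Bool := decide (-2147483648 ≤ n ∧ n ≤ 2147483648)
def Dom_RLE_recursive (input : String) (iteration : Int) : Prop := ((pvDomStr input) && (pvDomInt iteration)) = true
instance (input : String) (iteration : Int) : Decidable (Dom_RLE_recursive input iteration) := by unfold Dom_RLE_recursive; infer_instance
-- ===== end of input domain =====

-- B replaces A's counter state machine with cap-at-9 skip and tail recursion over iteration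
-- by a single fold per pass carrying (prev, run) that emits each maximal run's chunks in
-- closed form via divmod(run, 9), inside a flat loop over iteration (objective: alternative).

-- ===== PORT A =====

-- str(cpt); exact here since A only prints cpt ∈ 1..9, a single digit
def pvDigit (n : Nat) : Char := Char.ofNat (48 + n)

-- A's while loop over i, as the obvious structural recursion on the suffix input[i:]
-- (state: remaining suffix, cpt, accumulated chaine_compressee)
def pvLoopA : List Char → Nat → List Char → List Char
  | [], _, acc => acc                                   -- i = length: loop ends
  | [c], cpt, acc => acc ++ [pvDigit cpt, c]            -- i = length-1 branch
  | c :: d :: t, cpt, acc =>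
    if c = d then
      if cpt + 1 = 9 then pvLoopA t 1 (acc ++ [pvDigit 9, c])   -- cpt == 9: emit and i += 2
      else pvLoopA (d :: t) (cpt + 1) acc
    else pvLoopA (d :: t) 1 (acc ++ [pvDigit cpt, c])

def RLE_recursive (input : String) (iteration : Int) : String :=
  if input = "" ∨ iteration = 0 then input
  else if iteration ≤ 0 then input   -- Python raises (TypeError) here; excluded by Pre_
  else RLE_recursive (String.ofList (pvLoopA input.toList 1 [])) (iteration - 1)
termination_by iteration.toNat
decreasing_by omega

-- ===== PORT B =====

-- the q, r = divmod(run, 9) emission: ('9'+prev)*q if q, str(r)+prev if r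
def pvEncodeRun (c : Char) (n : Nat) : List Char :=
  (List.replicate (n / 9) [pvDigit 9, c]).flatten ++
    (if n % 9 = 0 then [] else [pvDigit (n % 9), c])

-- Source B's 'for ch in input[1:]' with state (prev, run, out); the trailing emission after
-- the loop is the [] case (the emission code appears twice in Source B, as here)
def pvFoldB : Char → Nat → List Char → List Char → List Char
  | prev, run, acc, [] => acc ++ pvEncodeRun prev run
  | prev, run, acc, ch :: t =>
    if ch = prev then pvFoldB prev (run + 1) acc t
    else pvFoldB ch 1 (acc ++ pvEncodeRun prev run) t

-- one pass of Source B's outer for-loop body; the [] case is unreachable there (the loop body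
-- only ever sees nonempty input) and is given for totality
def pvPassBs (s : String) : String :=
  match s.toList with
  | [] => s
  | c :: t => String.ofList (pvFoldB c 1 [] t)

def RLE_recursive_alt (input : String) (iteration : Int) : String :=
  if input = "" ∨ iteration = 0 then input
  else if iteration ≤ 0 then input   -- Python raises (TypeError) here; excluded by Pre_
  else pvPassBs^[iteration.toNat] input   -- for _ in range(iteration): input = pass(input)

-- ===== PRECONDITION & SPEC =====
-- Pre_ excludes only nonempty input with negative iteration, on which A raises
-- (a TypeError from 'raise <string>'); everywhere A returns a value it is admitted.
def Pre_RLE_recursive (input : String) (iteration : Int) : Prop :=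
  input = "" ∨ 0 ≤ iteration
instance (input : String) (iteration : Int) : Decidable (Pre_RLE_recursive input iteration) := by
  unfold Pre_RLE_recursive; infer_instance

def pvWitness_RLE_recursive : String × Int := ("aab", 2)

def Spec_RLE_recursive (input : String) (iteration : Int) (out : String) : Prop :=
  out = RLE_recursive_alt input iteration
instance (input : String) (iteration : Int) (out : String) :
    Decidable (Spec_RLE_recursive input iteration out) := by
  unfold Spec_RLE_recursive; infer_instance

-- ===== CLAIM (what is proved, stated in full; the proofs are below) =====
def Claim_equal_RLE_recursive : Prop :=
  ∀ (input : String) (iteration : Int), Dom_RLE_recursive input iteration →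
    Pre_RLE_recursive input iteration →
    Spec_RLE_recursive input iteration (RLE_recursive input iteration)

-- ===== LEMMAS AND PROOFS =====

-- proof-side bridge: a pass splits the string into maximal runs (pvCountRun/pvPassB),
-- and both A's loop and B's fold emit pvEncodeRun per run
def pvCountRun (c : Char) : List Char → Nat × List Char
  | [] => (0, [])
  | d :: t => if d = c then ((pvCountRun c t).1 + 1, (pvCountRun c t).2) else (0, d :: t)

theorem pvCountRun_snd_length (c : Char) (t : List Char) :
    (pvCountRun c t).2.length ≤ t.length := by
  induction t with
  | nil => simp [pvCountRun]
  | cons d t ih => by_cases h : d = c <;> simp [pvCountRun, h] <;> omega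

def pvPassB : List Char → List Char
  | [] => []
  | c :: t => pvEncodeRun c ((pvCountRun c t).1 + 1) ++ pvPassB (pvCountRun c t).2
termination_by s => s.length
decreasing_by have := pvCountRun_snd_length c t; simp; omega

theorem pvCountRun_decomp (c : Char) (t : List Char) :
    t = List.replicate (pvCountRun c t).1 c ++ (pvCountRun c t).2 := by
  induction t with
  | nil => simp [pvCountRun]
  | cons d t ih =>
    by_cases h : d = c
    · subst h; simp [pvCountRun, List.replicate_succ]; exact ih
    · simp [pvCountRun, h]

theorem pvCountRun_head (c : Char) (t : List Char) (d : Char) (t' : List Char)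
    (h : (pvCountRun c t).2 = d :: t') : d ≠ c := by
  induction t with
  | nil => simp [pvCountRun] at h
  | cons e t ih =>
    by_cases he : e = c
    · simp [pvCountRun, he] at h; exact ih h
    · simp [pvCountRun, he] at h; rw [← h.1]; exact he

theorem pvEncodeRun_add9 (c : Char) (n : Nat) :
    pvEncodeRun c (n + 9) = [pvDigit 9, c] ++ pvEncodeRun c n := by
  have h1 : (n + 9) / 9 = n / 9 + 1 := Nat.add_div_right n (by norm_num)
  have h2 : (n + 9) % 9 = n % 9 := Nat.add_mod_right n 9
  simp [pvEncodeRun, h1, h2, List.replicate_succ]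

theorem pvEncodeRun_small (c : Char) (cpt : Nat) (h1 : 1 ≤ cpt) (h2 : cpt ≤ 8) :
    pvEncodeRun c cpt = [pvDigit cpt, c] := by
  have hd : cpt / 9 = 0 := Nat.div_eq_of_lt (by omega)
  have hm : cpt % 9 = cpt := Nat.mod_eq_of_lt (by omega)
  have hne : cpt ≠ 0 := by omega
  simp [pvEncodeRun, hd, hm, hne]

theorem pvEncodeRun_ne_nil (c : Char) (n : Nat) (h : 1 ≤ n) : pvEncodeRun c n ≠ [] := by
  unfold pvEncodeRun
  intro hc
  rcases List.append_eq_nil_iff.mp hc with ⟨hl, hr⟩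
  by_cases hm : n % 9 = 0
  · have hd : 1 ≤ n / 9 := by
      rcases Nat.lt_or_ge (n / 9) 1 with h' | h'
      · exfalso; have := Nat.div_add_mod n 9; omega
      · exact h'
    rcases Nat.exists_eq_add_of_le hd with ⟨k, hk⟩
    rw [hk] at hl
    simp [List.replicate_succ] at hl
  · simp [hm] at hr

-- A's loop over a run of j copies of c (counter currently cpt) emits the closed-form chunks
theorem pvLoopA_run : ∀ (j : Nat), 1 ≤ j → ∀ (c : Char) (rest : List Char) (cpt : Nat)
    (acc : List Char), 1 ≤ cpt → cpt ≤ 8 →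
    (∀ d t', rest = d :: t' → d ≠ c) →
    pvLoopA (List.replicate j c ++ rest) cpt acc
      = pvLoopA rest 1 (acc ++ pvEncodeRun c (j + cpt - 1)) := by
  intro j
  induction j using Nat.strong_induction_on with
  | _ j ih =>
    intro hj c rest cpt acc h1 h8 hrest
    match j, hj with
    | 1, _ =>
      have henc : pvEncodeRun c cpt = [pvDigit cpt, c] := pvEncodeRun_small c cpt h1 h8
      cases rest with
      | nil => simp [pvLoopA, henc]
      | cons d t' =>
        have hd : ¬ (c = d) := fun h => (hrest d t' rfl) h.symm
        simp [pvLoopA, hd, henc]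
    | (k+2), _ =>
      have hsplit : List.replicate (k+2) c ++ rest
          = c :: c :: (List.replicate k c ++ rest) := by
        simp [List.replicate_succ]
      rw [hsplit]
      by_cases h9 : cpt + 1 = 9
      · have hcpt : cpt = 8 := by omega
        subst hcpt
        rw [pvLoopA, if_pos rfl, if_pos (show (8:Nat) + 1 = 9 from rfl)]
        cases k with
        | zero =>
          have h0 : (2 + 8 - 1 : Nat) = 0 + 9 := by omega
          simp only [List.replicate, List.nil_append, h0, pvEncodeRun_add9]
          simp [pvEncodeRun]
        | succ k' =>
          rw [ih (k' + 1) (by omega) (by omega) c rest 1 (acc ++ [pvDigit 9, c])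
              (by omega) (by omega) hrest]
          have hk1 : (k' + 1 + 1 - 1 : Nat) = k' + 1 := by omega
          rw [hk1]
          have hk2 : (k' + 1 + 2 + 8 - 1 : Nat) = (k' + 1) + 9 := by omega
          rw [hk2, pvEncodeRun_add9]
          simp
      · rw [pvLoopA, if_pos rfl, if_neg h9]
        rw [show (c :: (List.replicate k c ++ rest)) = List.replicate (k+1) c ++ rest by
          simp [List.replicate_succ]]
        rw [ih (k+1) (by omega) (by omega) c rest (cpt+1) acc (by omega) (by omega) hrest]
        have hk : (k + 1 + (cpt + 1) - 1 : Nat) = k + 2 + cpt - 1 := by omega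
        rw [hk]

theorem pvLoopA_eq_pvPassB_aux : ∀ (n : Nat) (s : List Char), s.length ≤ n →
    ∀ acc, pvLoopA s 1 acc = acc ++ pvPassB s := by
  intro n
  induction n with
  | zero =>
    intro s h acc
    cases s with
    | nil => simp [pvLoopA, pvPassB]
    | cons c t => simp at h
  | succ n ih =>
    intro s h acc
    cases s with
    | nil => simp [pvLoopA, pvPassB]
    | cons c t =>
      have hpb : pvPassB (c :: t)
          = pvEncodeRun c ((pvCountRun c t).1 + 1) ++ pvPassB (pvCountRun c t).2 := by
        rw [pvPassB.eq_def]
      have hs : c :: t = List.replicate ((pvCountRun c t).1 + 1) c ++ (pvCountRun c t).2 := by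
        conv_lhs => rw [pvCountRun_decomp c t]
        simp [List.replicate_succ]
      conv_lhs => rw [hs]
      rw [pvLoopA_run ((pvCountRun c t).1 + 1) (by omega) c (pvCountRun c t).2 1 acc
          (by omega) (by omega) (fun d t' hh => pvCountRun_head c t d t' hh)]
      have hle : (pvCountRun c t).2.length ≤ n := by
        have := pvCountRun_snd_length c t
        simp at h; omega
      rw [ih (pvCountRun c t).2 hle]
      have h1 : ((pvCountRun c t).1 + 1 + 1 - 1 : Nat) = (pvCountRun c t).1 + 1 := by omega
      rw [h1, hpb]
      simp

theorem pvLoopA_eq_pvPassB (s acc : List Char) : pvLoopA s 1 acc = acc ++ pvPassB s :=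
  pvLoopA_eq_pvPassB_aux s.length s (Nat.le_refl _) acc

-- B's fold consumes the maximal run of prev, emits it (run counted so far included), recurses
theorem pvFoldB_eq : ∀ (t : List Char) (prev : Char) (run : Nat) (acc : List Char),
    pvFoldB prev run acc t
      = acc ++ pvEncodeRun prev (run + (pvCountRun prev t).1) ++ pvPassB (pvCountRun prev t).2 := by
  intro t
  induction t with
  | nil => intro prev run acc; simp [pvFoldB, pvCountRun, pvPassB]
  | cons ch t ih =>
    intro prev run acc
    by_cases h : ch = prev
    · subst h
      rw [pvFoldB, if_pos rfl, ih]
      simp [pvCountRun]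
      ring_nf
    · rw [pvFoldB, if_neg h, ih]
      have hc : pvCountRun prev (ch :: t) = (0, ch :: t) := by simp [pvCountRun, h]
      rw [hc]
      have hp : pvPassB (ch :: t)
          = pvEncodeRun ch ((pvCountRun ch t).1 + 1) ++ pvPassB (pvCountRun ch t).2 := by
        rw [pvPassB.eq_def]
      rw [hp]
      simp [Nat.add_comm]

theorem pvPassBs_eq (s : String) : pvPassBs s = String.ofList (pvPassB s.toList) := by
  unfold pvPassBs
  cases hs : s.toList with
  | nil =>
    have : s = "" := by
      rw [← String.toList_inj, hs]; rfl
    simp [this, pvPassB]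
  | cons c t =>
    show String.ofList (pvFoldB c 1 [] t) = String.ofList (pvPassB (c :: t))
    rw [pvFoldB_eq]
    have hp : pvPassB (c :: t)
        = pvEncodeRun c ((pvCountRun c t).1 + 1) ++ pvPassB (pvCountRun c t).2 := by
      rw [pvPassB.eq_def]
    rw [hp]
    simp [Nat.add_comm]

theorem pvPassB_ne_nil (s : List Char) (h : s ≠ []) : pvPassB s ≠ [] := by
  cases s with
  | nil => exact absurd rfl h
  | cons c t =>
    rw [pvPassB]
    intro hcon
    rcases List.append_eq_nil_iff.mp hcon with ⟨h1, _⟩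
    exact pvEncodeRun_ne_nil c ((pvCountRun c t).1 + 1) (by omega) h1

theorem pvPassBs_ne_empty (s : String) (h : s ≠ "") : pvPassBs s ≠ "" := by
  rw [pvPassBs_eq]
  intro hcon
  apply pvPassB_ne_nil s.toList
  · intro ht
    apply h
    simp [← String.toList_inj, ht]
  · have := congrArg String.toList hcon
    simpa using this

theorem pvMain : ∀ (n : Nat) (input : String),
    RLE_recursive input (n : Int) = RLE_recursive_alt input (n : Int) := by
  intro n
  induction n with
  | zero => intro input; rw [RLE_recursive, RLE_recursive_alt]; simp
  | succ n ih =>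
    intro input
    by_cases hin : input = ""
    · rw [RLE_recursive, RLE_recursive_alt]; simp [hin]
    · have hg1 : ¬ (input = "" ∨ (((n + 1 : Nat) : Int)) = 0) := by
        rintro (hc | hc)
        · exact hin hc
        · omega
      have hg2 : ¬ (((n + 1 : Nat) : Int) ≤ 0) := by omega
      rw [RLE_recursive, RLE_recursive_alt]
      rw [if_neg hg1, if_neg hg1, if_neg hg2, if_neg hg2]
      have hA : (((n + 1 : Nat) : Int) - 1) = (n : Int) := by push_cast; ring
      rw [hA]
      have hpass : String.ofList (pvLoopA input.toList 1 []) = pvPassBs input := by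
        rw [pvLoopA_eq_pvPassB, List.nil_append, pvPassBs_eq]
      rw [hpass, ih (pvPassBs input)]
      have htn : ((n + 1 : Nat) : Int).toNat = n + 1 := by omega
      rw [htn, Function.iterate_succ_apply]
      cases n with
      | zero => rw [RLE_recursive_alt]; simp
      | succ m =>
        rw [RLE_recursive_alt]
        have hne : pvPassBs input ≠ "" := pvPassBs_ne_empty input hin
        have hg1' : ¬ (pvPassBs input = "" ∨ ((m + 1 : Nat) : Int) = 0) := by
          rintro (hc | hc)
          · exact hne hc
          · omega
        have hg2' : ¬ (((m + 1 : Nat) : Int) ≤ 0) := by omega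
        rw [if_neg hg1', if_neg hg2']
        have hm1 : ((m + 1 : Nat) : Int).toNat = m + 1 := by omega
        rw [hm1]

-- ===== VERDICT (by name: the statement is the Claim_ definition above) =====
theorem RLE_recursive_spec : Claim_equal_RLE_recursive := by
  unfold Claim_equal_RLE_recursive
  intro input iteration _ hpre
  unfold Spec_RLE_recursive
  rcases hpre with hin | h0
  · rw [RLE_recursive, RLE_recursive_alt]; simp [hin]
  · have hit : iteration = (iteration.toNat : Int) := by omega
    rw [hit]
    exact pvMain iteration.toNat input
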